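-- pv_equiv track=rewrite | github.com/hanlyang0522/AlgoSelf | 이코테/1_모험가_길드.py | maxTravel
-- ===== SOURCE A (Python) =====
-- def maxTravel(n, trav):
--     trav.sort()
--     group, cnt = 0, 1
--
--     for t in trav:
--         if cnt >= t:
--             group += 1
--             cnt = 1
--         else:
--             cnt += 1
--
--     return group
-- ===== SOURCE B (Python) =====
-- def maxTravel(n, trav):
--     counts = {}
--     for t in trav:
--         counts[t] = counts.get(t, 0) + 1
--     group, cnt = 0, 1
--     for v in sorted(counts):
--         c = counts[v]
--         if v <= 1:
--             group += c
--             cnt = 1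
--         else:
--             group += (cnt - 1 + c) // v
--             cnt = (cnt - 1 + c) % v + 1
--     return group
-- ===== Notes on version B (the rewrite author's own statement) =====
-- stated objective: alternative
-- what changed: B replaces A's per-element greedy pass over the fully sorted list by a frequency dictionary plus one arithmetic step (floordiv/mod) per distinct fear value, so it only sorts the k distinct values and handles all duplicates of a value in O(1); B also does not mutate trav (A sorts it in place).
import Mathlib
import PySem

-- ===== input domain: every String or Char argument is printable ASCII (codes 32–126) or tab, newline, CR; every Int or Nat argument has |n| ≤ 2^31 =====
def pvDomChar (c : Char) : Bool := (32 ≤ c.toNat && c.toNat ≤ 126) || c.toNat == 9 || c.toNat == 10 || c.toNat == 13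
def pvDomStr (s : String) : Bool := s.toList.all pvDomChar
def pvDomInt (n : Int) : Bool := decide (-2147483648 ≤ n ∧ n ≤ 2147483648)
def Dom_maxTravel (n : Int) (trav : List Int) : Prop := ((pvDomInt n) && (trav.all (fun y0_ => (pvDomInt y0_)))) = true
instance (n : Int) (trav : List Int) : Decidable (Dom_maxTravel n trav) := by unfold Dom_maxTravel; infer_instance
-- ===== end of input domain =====

-- B groups the sorted values by frequency and advances the greedy state arithmetically per
-- distinct value instead of per element; return values agree everywhere (A additionally sorts
-- trav in place — the equivalence proved here is about the return value only).

-- ===== PORT A =====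
-- loop body of A's for-loop: if cnt >= t: group += 1; cnt = 1 else: cnt += 1
def stepA (p : Int × Int) (t : Int) : Int × Int :=
  if p.2 ≥ t then (p.1 + 1, 1) else (p.1, p.2 + 1)

def maxTravel (n : Int) (trav : List Int) : Int :=
  ((PySem.List.sorted trav (fun x => x) false).foldl stepA (0, 1)).1

-- ===== PORT B =====
-- loop body of B's for-loop over one distinct value v with multiplicity c
def stepB (p : Int × Int) (v c : Int) : Int × Int :=
  if v ≤ 1 then (p.1 + c, 1)
  else (p.1 + PySem.Int.floordiv (p.2 - 1 + c) v, PySem.Int.mod (p.2 - 1 + c) v + 1)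

def maxTravel_alt (n : Int) (trav : List Int) : Int :=
  let counts := trav.foldl (fun d t => d.insert t (d.getD t 0 + 1)) (PySem.Dict.empty)
  -- `c = counts[v]`: v iterates over counts' keys, so the lookup always hits; getD is exact here
  ((PySem.List.sorted counts.keys (fun x => x) false).foldl
      (fun p v => stepB p v (counts.getD v 0)) (0, 1)).1

-- ===== PRECONDITION & SPEC =====
def Spec_maxTravel (n : Int) (trav : List Int) (out : Int) : Prop := out = maxTravel_alt n trav
instance (n : Int) (trav : List Int) (out : Int) : Decidable (Spec_maxTravel n trav out) := by unfold Spec_maxTravel; infer_instance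

-- ===== CLAIM (what is proved, stated in full; the proofs are below) =====
def Claim_equal_maxTravel : Prop := ∀ (n : Int) (trav : List Int), Dom_maxTravel n trav → Spec_maxTravel n trav (maxTravel n trav)

-- ===== LEMMAS AND PROOFS =====

-- folding stepA over c copies of a value v ≤ 1 from any cnt ≥ 1 closes a group each time
lemma foldA_replicate_le_one (v : Int) (hv : v ≤ 1) :
    ∀ (c : Nat) (g s : Int), 1 ≤ s →
      (List.replicate c v).foldl stepA (g, s) = (g + c, if c = 0 then s else 1) := by
  intro c
  induction c with
  | zero => intro g s _; simp
  | succ c ih =>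
    intro g s hs
    rw [List.replicate_succ, List.foldl_cons]
    have hstep : stepA (g, s) v = (g + 1, 1) := by
      simp [stepA, show s ≥ v by omega]
    rw [hstep, ih (g + 1) 1 le_rfl]
    by_cases hc0 : c = 0 <;> simp [hc0, Prod.mk.injEq] <;> push_cast <;> try ring

-- folding stepA over c copies of a value v ≥ 2 from cnt = s, 1 ≤ s ≤ v, is one division
lemma foldA_replicate_ge_two (v : Int) (hv : 2 ≤ v) :
    ∀ (c : Nat) (g s : Int), 1 ≤ s → s ≤ v →
      (List.replicate c v).foldl stepA (g, s)
        = (g + (s - 1 + c) / v, (s - 1 + c) % v + 1) := by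
  intro c
  induction c with
  | zero =>
    intro g s h1 h2
    have hd : (s - 1) / v = 0 := Int.ediv_eq_zero_of_lt (by omega) (by omega)
    have hm : (s - 1) % v = s - 1 := Int.emod_eq_of_lt (by omega) (by omega)
    simp [hd, hm]
  | succ c ih =>
    intro g s h1 h2
    rw [List.replicate_succ, List.foldl_cons]
    by_cases hsv : s ≥ v
    · have hs : s = v := le_antisymm h2 hsv
      have hstep : stepA (g, s) v = (g + 1, 1) := by simp [stepA, hsv]
      rw [hstep, ih (g + 1) 1 le_rfl (by omega)]
      have e1 : (s - 1 + ((c : Int) + 1)) = (c : Int) + v * 1 := by rw [hs]; ring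
      have hd : ((c : Int) + v * 1) / v = (c : Int) / v + 1 :=
        Int.add_mul_ediv_left _ _ (by omega)
      have hm : ((c : Int) + v * 1) % v = (c : Int) % v := Int.add_mul_emod_self_left ..
      push_cast
      rw [e1, hd, hm]
      simp only [zero_add, Prod.mk.injEq]
      exact ⟨by ring, trivial⟩
    · have hstep : stepA (g, s) v = (g, s + 1) := by simp [stepA]; omega
      rw [hstep, ih g (s + 1) (by omega) (by omega)]
      push_cast
      ring_nf
  
-- folding over a flatMap is the nested fold
lemma foldl_flatMap_stepA (f : Int → List Int) :
    ∀ (ks : List Int) (init : Int × Int),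
      (ks.flatMap f).foldl stepA init = ks.foldl (fun p v => (f v).foldl stepA p) init := by
  intro ks
  induction ks with
  | nil => intro init; simp
  | cons v t ih => intro init; simp [List.flatMap_cons, List.foldl_append, ih]

-- the main correspondence: per-element fold over each value's replicate block = one stepB per value
lemma fold_blocks_eq_fold_stepB (cnt : Int → Int) :
    ∀ (ks : List Int) (g s : Int), ks.Pairwise (· < ·) → (∀ v ∈ ks, 1 ≤ cnt v) →
      1 ≤ s → (∀ w ∈ ks, w ≤ 1 ∨ s ≤ w) →
      ks.foldl (fun p v => (List.replicate (cnt v).toNat v).foldl stepA p) (g, s)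
        = ks.foldl (fun p v => stepB p v (cnt v)) (g, s) := by
  intro ks
  induction ks with
  | nil => intro g s _ _ _ _; rfl
  | cons v t ih =>
    intro g s hpw hcnt hs hbound
    have hpw' := (List.pairwise_cons.mp hpw).2
    have hlt := (List.pairwise_cons.mp hpw).1
    have hc1 : 1 ≤ cnt v := hcnt v (List.mem_cons_self ..)
    have hcast : ((cnt v).toNat : Int) = cnt v := Int.toNat_of_nonneg (by omega)
    rw [List.foldl_cons, List.foldl_cons]
    by_cases hv : v ≤ 1
    · have hb : stepB (g, s) v (cnt v) = (g + cnt v, 1) := by simp [stepB, hv]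
      have hc0 : (cnt v).toNat ≠ 0 := by omega
      rw [foldA_replicate_le_one v hv _ g s hs, hcast, if_neg hc0, hb]
      exact ih (g + cnt v) 1 hpw' (fun w hw => hcnt w (List.mem_cons_of_mem _ hw))
        le_rfl (fun w _ => by omega)
    · have hv2 : 2 ≤ v := by omega
      have hsv : s ≤ v := by rcases hbound v (List.mem_cons_self ..) with h | h; omega; exact h
      have hb : stepB (g, s) v (cnt v)
          = (g + (s - 1 + cnt v) / v, (s - 1 + cnt v) % v + 1) := by
        rw [stepB, if_neg hv,
          PySem.Int.floordiv_eq_ediv_of_pos (by omega), PySem.Int.mod_eq_emod_of_pos (by omega)]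
      rw [foldA_replicate_ge_two v hv2 _ g s hs hsv, hcast, hb]
      have hmod1 : 1 ≤ (s - 1 + cnt v) % v + 1 := by
        have := Int.emod_nonneg (s - 1 + cnt v) (show v ≠ 0 by omega); omega
      have hmod2 : (s - 1 + cnt v) % v + 1 ≤ v := by
        have := Int.emod_lt_of_pos (s - 1 + cnt v) (show 0 < v by omega); omega
      refine ih _ _ hpw' (fun w hw => hcnt w (List.mem_cons_of_mem _ hw)) hmod1 ?_
      intro w hw
      have := hlt w hw
      omega

-- count of any element in a flatMap of replicate blocks over a Nodup value list
lemma count_flatMap_replicate (m : Int → Nat) :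
    ∀ (ks : List Int), ks.Nodup → ∀ (a : Int),
      (ks.flatMap (fun v => List.replicate (m v) v)).count a = if a ∈ ks then m a else 0 := by
  intro ks
  induction ks with
  | nil => intro _ a; simp
  | cons v t ih =>
    intro hnd a
    rw [List.flatMap_cons, List.count_append, List.count_replicate,
      ih (List.nodup_cons.mp hnd).2 a]
    by_cases hav : a = v
    · subst hav
      have : a ∉ t := (List.nodup_cons.mp hnd).1
      simp [this]
    · simp [hav, Ne.symm hav, List.mem_cons]

-- the flatMap of replicate blocks is pairwise ≤ when the value list is strictly increasing
lemma pairwise_flatMap_replicate (m : Int → Nat) :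
    ∀ (ks : List Int), ks.Pairwise (· < ·) →
      (ks.flatMap (fun v => List.replicate (m v) v)).Pairwise (· ≤ ·) := by
  intro ks
  induction ks with
  | nil => intro _; simp
  | cons v t ih =>
    intro hpw
    rw [List.flatMap_cons]
    apply List.pairwise_append.mpr
    refine ⟨List.pairwise_replicate.mpr (Or.inr le_rfl), ih (List.pairwise_cons.mp hpw).2, ?_⟩
    intro x hx y hy
    have hxv : x = v := List.eq_of_mem_replicate hx
    rcases List.mem_flatMap.mp hy with ⟨w, hw, hyw⟩
    have hyw' : y = w := List.eq_of_mem_replicate hyw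
    have := (List.pairwise_cons.mp hpw).1 w hw
    omega

-- sorted trav decomposes into the replicate blocks of its sorted distinct values
lemma sorted_eq_flatMap_replicate (trav : List Int) :
    PySem.List.sorted trav (fun x => x) false
      = (PySem.List.sorted (PySem.Set.ofList trav) (fun x => x) false).flatMap
          (fun v => List.replicate (trav.count v) v) := by
  set ks := PySem.List.sorted (PySem.Set.ofList trav) (fun x => x) false with hks
  have hpw : ks.Pairwise (· < ·) := by
    rw [hks]; exact PySem.List.sorted_ofList_pairwise_lt trav
  have hnd : ks.Nodup := hpw.nodup
  have hmem : ∀ a : Int, a ∈ ks ↔ a ∈ trav := by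
    intro a
    rw [hks, PySem.List.mem_sorted, PySem.Set.mem_ofList]
  apply PySem.List.sorted_id_eq_of_perm_of_pairwise
  · apply List.perm_iff_count.mpr
    intro a
    rw [count_flatMap_replicate (fun v => trav.count v) ks hnd a]
    by_cases ha : a ∈ trav
    · simp [(hmem a).mpr ha]
    · have : a ∉ ks := fun h => ha ((hmem a).mp h)
      simp [this, List.count_eq_zero_of_not_mem ha]
  · exact pairwise_flatMap_replicate _ ks hpw

-- ===== VERDICT (by name: the statement is the Claim_ definition above) =====
theorem maxTravel_spec : Claim_equal_maxTravel := by
  intro n trav _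
  unfold Spec_maxTravel maxTravel maxTravel_alt
  rw [PySem.Dict.foldl_insert_getD_add_one_eq_counter]
  have hkeys : (PySem.Dict.counter trav).keys = PySem.Set.ofList trav :=
    PySem.Dict.keys_counter trav
  have hgetD : ∀ v : Int, (PySem.Dict.counter trav).getD v 0 = (trav.count v : Int) :=
    fun v => PySem.Dict.getD_counter trav v
  simp only [hkeys, hgetD]
  set ks := PySem.List.sorted (PySem.Set.ofList trav) (fun x => x) false with hks
  have hpw : ks.Pairwise (· < ·) := by
    rw [hks]; exact PySem.List.sorted_ofList_pairwise_lt trav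
  rw [sorted_eq_flatMap_replicate trav,
    show (fun v => List.replicate (trav.count v) v)
        = (fun v => List.replicate ((trav.count v : Int)).toNat v) by
      funext v; simp,
    foldl_flatMap_stepA, ← hks,
    fold_blocks_eq_fold_stepB (fun v => (trav.count v : Int)) ks 0 1 hpw ?_ le_rfl ?_]
  · intro v hv
    have hvt : v ∈ trav := by
      rw [hks, PySem.List.mem_sorted, PySem.Set.mem_ofList] at hv; exact hv
    have := List.count_pos_iff.mpr hvt
    show (1 : Int) ≤ (trav.count v : Int)
    omega
  · intro w _; omega
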